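-- pv_equiv track=rewrite | github.com/Mateus00/python | exercicios/lista_ordenada.py | verificar_lista
-- ===== SOURCE A (Python) =====
-- def verificar_lista(lista):
--     tem_numero = any(l.isdigit() for l in lista)
--     tem_letra = any(not l.isdigit() for l in lista)
--
--     ordenadas_asc = all(str(lista[i]) <= str(lista[i+1]) for i in range(len(lista)-1))
--     ordenadas_dsc = all(str(lista[i]) >= str(lista[i+1]) for i in range(len(lista)-1))
--
--     ordem = 'Não está Ordenada! '
--
--     if ordenadas_asc:
--         ordem = 'Está Ordenada asc! '
--
--     if ordenadas_dsc:
--         ordem = 'Está Ordenada desc! '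
--
--
--     return (ordem, " Tem Numero! " if tem_numero else " Não tem Numero! ", " Tem Letra! " if tem_letra else " Não tem Letra! ")
-- ===== SOURCE B (Python) =====
-- def verificar_lista(lista):
--     tem_numero = False
--     tem_letra = False
--     asc = True
--     dsc = True
--     prev = None
--     for l in lista:
--         if l.isdigit():
--             tem_numero = True
--         else:
--             tem_letra = True
--         if prev is not None:
--             if str(prev) > str(l):
--                 asc = False
--             if str(prev) < str(l):
--                 dsc = False
--         prev = l
--     if dsc:
--         ordem = 'Está Ordenada desc! '
--     elif asc:
--         ordem = 'Está Ordenada asc! '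
--     else:
--         ordem = 'Não está Ordenada! '
--     return (ordem, " Tem Numero! " if tem_numero else " Não tem Numero! ", " Tem Letra! " if tem_letra else " Não tem Letra! ")
-- ===== Notes on version B (the rewrite author's own statement) =====
-- stated objective: simpler
-- what changed: A makes four separate generator passes (two any, two all over index ranges); B computes all four facts in one loop carrying the previous element and four flags, no indexing.
import Mathlib
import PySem

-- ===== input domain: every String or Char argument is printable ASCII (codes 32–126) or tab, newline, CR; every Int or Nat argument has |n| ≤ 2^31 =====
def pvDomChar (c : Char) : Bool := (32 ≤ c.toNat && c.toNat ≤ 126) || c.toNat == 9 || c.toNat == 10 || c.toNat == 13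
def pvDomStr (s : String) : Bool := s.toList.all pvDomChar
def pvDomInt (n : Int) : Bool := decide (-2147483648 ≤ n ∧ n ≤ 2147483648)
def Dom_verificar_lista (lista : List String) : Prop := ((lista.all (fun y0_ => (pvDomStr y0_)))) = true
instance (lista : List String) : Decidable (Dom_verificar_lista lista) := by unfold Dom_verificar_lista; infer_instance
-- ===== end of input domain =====

-- B replaces A's four separate passes by one loop carrying the previous element and four flags (objective: simpler); return values proved equal on Dom.
-- ===== PORT A =====
-- A: four separate passes (two `any` generators, two index-range `all`s), then two ifs on ordem.
def verificar_lista (lista : List String) : String × String × String :=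
  let tem_numero := lista.any (fun l => PySem.Str.strIsdigit l)
  let tem_letra := lista.any (fun l => ! PySem.Str.strIsdigit l)
  let ordenadas_asc := (PySem.List.pyRange 0 ((lista.length : Int) - 1) 1).all
      (fun i => decide (PySem.List.pyGetD lista i "" ≤ PySem.List.pyGetD lista (i + 1) ""))
  let ordenadas_dsc := (PySem.List.pyRange 0 ((lista.length : Int) - 1) 1).all
      (fun i => decide (PySem.List.pyGetD lista (i + 1) "" ≤ PySem.List.pyGetD lista i ""))
  let ordem := "Não está Ordenada! "
  let ordem := if ordenadas_asc then "Está Ordenada asc! " else ordem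
  let ordem := if ordenadas_dsc then "Está Ordenada desc! " else ordem
  (ordem, if tem_numero then " Tem Numero! " else " Não tem Numero! ",
          if tem_letra then " Tem Letra! " else " Não tem Letra! ")

-- ===== PORT B =====
-- B: one loop over the list carrying the previous element and four flags (Source B's for-loop).
def verificar_lista_altLoop (prev : Option String) (tn tl asc dsc : Bool) :
    List String → Bool × Bool × Bool × Bool
  | [] => (tn, tl, asc, dsc)
  | x :: t =>
    let tn := if PySem.Str.strIsdigit x then true else tn
    let tl := if PySem.Str.strIsdigit x then tl else true
    let asc := match prev with
      | none => asc
      | some p => if decide (x < p) then false else asc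
    let dsc := match prev with
      | none => dsc
      | some p => if decide (p < x) then false else dsc
    verificar_lista_altLoop (some x) tn tl asc dsc t

def verificar_lista_alt (lista : List String) : String × String × String :=
  let r := verificar_lista_altLoop none false false true true lista
  let ordem := if r.2.2.2 then "Está Ordenada desc! "
               else if r.2.2.1 then "Está Ordenada asc! "
               else "Não está Ordenada! "
  (ordem, if r.1 then " Tem Numero! " else " Não tem Numero! ",
          if r.2.1 then " Tem Letra! " else " Não tem Letra! ")

-- ===== PRECONDITION & SPEC =====
def Spec_verificar_lista (lista : List String) (out : String × String × String) : Prop := out = verificar_lista_alt lista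
instance (lista : List String) (out : String × String × String) : Decidable (Spec_verificar_lista lista out) := by unfold Spec_verificar_lista; infer_instance

-- ===== CLAIM (what is proved, stated in full; the proofs are below) =====
def Claim_equal_verificar_lista : Prop := ∀ (lista : List String), Dom_verificar_lista lista → Spec_verificar_lista lista (verificar_lista lista)

-- ===== LEMMAS AND PROOFS =====

-- chained adjacent comparison starting from a previous element
def pvChain (p : String → String → Bool) : String → List String → Bool
  | _, [] => true
  | v, x :: t => p v x && pvChain p x t

lemma altLoop_spec (t : List String) (pv : String) (tn tl asc dsc : Bool) :
    verificar_lista_altLoop (some pv) tn tl asc dsc t =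
      (tn || t.any (fun l => PySem.Str.strIsdigit l),
       tl || t.any (fun l => ! PySem.Str.strIsdigit l),
       asc && pvChain (fun a b => decide (a ≤ b)) pv t,
       dsc && pvChain (fun a b => decide (b ≤ a)) pv t) := by
  induction t generalizing pv tn tl asc dsc with
  | nil => simp [verificar_lista_altLoop, pvChain]
  | cons x t ih =>
    simp only [verificar_lista_altLoop, ih, List.any_cons, pvChain, Prod.mk.injEq]
    refine ⟨?_, ?_, ?_, ?_⟩
    · cases PySem.Str.strIsdigit x <;> cases tn <;> simp
    · cases PySem.Str.strIsdigit x <;> cases tl <;> simp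
    · by_cases h : x < pv
      · simp [h, not_le.mpr h]
      · simp [h, not_lt.mp h]
    · by_cases h : pv < x
      · simp [h, not_le.mpr h]
      · simp [h, not_lt.mp h]

-- A's index-range `all` over adjacent pairs is the chained comparison
lemma rangeAll_chain (p : String → String → Bool) (x : String) (t : List String) :
    ((List.range ((x :: t).length - 1)).all
        (fun k => p ((x :: t).getD k "") ((x :: t).getD (k + 1) ""))) =
      pvChain p x t := by
  induction t generalizing x with
  | nil => simp [pvChain]
  | cons y t ih =>
    simp only [List.length_cons, Nat.add_sub_cancel, List.range_succ_eq_map,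
      List.all_cons, List.all_map, pvChain]
    congr 1
    rw [← ih y]
    simp [Function.comp_def, List.getD]

-- bridge: A's pyRange/pyGetD form to the Nat-range form
lemma pyRangeAll_eq (xs : List String) (p : String → String → Bool) :
    ((PySem.List.pyRange 0 ((xs.length : Int) - 1) 1).all
        (fun i => p (PySem.List.pyGetD xs i "") (PySem.List.pyGetD xs (i + 1) ""))) =
      ((List.range (xs.length - 1)).all
        (fun k => p (xs.getD k "") (xs.getD (k + 1) ""))) := by
  rw [PySem.List.pyRange_one,
    show (((xs.length : Int) - 1) - 0).toNat = xs.length - 1 by omega]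
  simp only [List.all_map, zero_add]
  congr 1
  funext k
  simp only [Function.comp_def]
  rw [show ((k : Int) + 1) = ((k + 1 : Nat) : Int) from by push_cast; ring,
    PySem.List.pyGetD_natCast, PySem.List.pyGetD_natCast]

theorem verificar_lista_spec : Claim_equal_verificar_lista := by
  intro lista _
  unfold Spec_verificar_lista verificar_lista verificar_lista_alt
  cases lista with
  | nil => rfl
  | cons x t =>
    have hasc := (pyRangeAll_eq (x :: t) (fun a b => decide (a ≤ b))).trans
      (rangeAll_chain (fun a b => decide (a ≤ b)) x t)
    have hdsc := (pyRangeAll_eq (x :: t) (fun a b => decide (b ≤ a))).trans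
      (rangeAll_chain (fun a b => decide (b ≤ a)) x t)
    simp only [] at hasc hdsc
    simp only [verificar_lista_altLoop, altLoop_spec, List.any_cons, hasc, hdsc]
    simp
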